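-- pv_equiv track=rewrite | github.com/wsekete/PDFParseV2 | src/pdf_parser/field_extractor.py | _infer_bem_category
-- ===== SOURCE A (Python) =====
-- from typing import Dict, List, Any, Optional
--
-- def _infer_bem_category(field_name: str, field_data: Dict) -> str:
--     """Infer BEM category from field name and context."""
--     field_name_lower = field_name.lower()
--
--     # Don't change RadioGroups - they have their own category
--     if field_data.get('type') == 'RadioGroup':
--         return 'general-information'
--
--     # Check if field already has BEM naming
--     if '_' in field_name and any(block in field_name_lower for block in ['personal-information', 'contingent-benficiary', 'sign-here']):
--         parts = field_name.split('_')
--         if len(parts) >= 2: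
--             return parts[0]  # Return the Block part
--
--     # Infer category from field name patterns
--     if any(term in field_name_lower for term in ['name', 'first', 'last', 'middle', 'mi']):
--         return 'personal-information'
--     elif any(term in field_name_lower for term in ['ssn', 'social', 'security']):
--         return 'personal-information'
--     elif any(term in field_name_lower for term in ['address', 'street', 'city', 'state', 'zip', 'postal']):
--         return 'personal-information'
--     elif any(term in field_name_lower for term in ['phone', 'email', 'contact']):
--         return 'personal-information'
--     elif any(term in field_name_lower for term in ['signature', 'sign', 'date']):
--         return 'sign-here'
--     elif any(term in field_name_lower for term in ['beneficiary', 'contingent', 'primary']):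
--         return 'contingent-benficiary'
--     elif any(term in field_name_lower for term in ['employer', 'company', 'organization']):
--         return 'employer-information'
--     elif any(term in field_name_lower for term in ['tax', 'withholding', 'allowance']):
--         return 'tax-information'
--     else:
--         return 'general-information'
-- ===== SOURCE B (Python) =====
-- # Different algorithm: instead of testing each keyword against the name,
-- # scan every substring of the lowered name (term lengths are 2..12) against a
-- # hash map term -> rank and keep the minimum rank seen; the category of the
-- # minimal-rank term is the answer (first-match-in-rule-order = minimal rank).
--
-- _RANK_PAIRS = [
--     ('name', 0), ('first', 1), ('last', 2), ('middle', 3), ('mi', 4),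
--     ('ssn', 5), ('social', 6), ('security', 7),
--     ('address', 8), ('street', 9), ('city', 10), ('state', 11),
--     ('zip', 12), ('postal', 13),
--     ('phone', 14), ('email', 15), ('contact', 16),
--     ('signature', 17), ('sign', 18), ('date', 19),
--     ('beneficiary', 20), ('contingent', 21), ('primary', 22),
--     ('employer', 23), ('company', 24), ('organization', 25),
--     ('tax', 26), ('withholding', 27), ('allowance', 28),
-- ]
-- _RANK_OF = dict(_RANK_PAIRS)
-- # categories by rank, sentinel 'general-information' at index 29 (= no term found)
-- _CATEGORY = (
--     ['personal-information'] * 17 + ['sign-here'] * 3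
--     + ['contingent-benficiary'] * 3 + ['employer-information'] * 3
--     + ['tax-information'] * 3 + ['general-information']
-- )
-- _LENGTHS = (2, 3, 4, 5, 6, 7, 8, 9, 10, 11, 12)  # the distinct term lengths
--
--
-- def _infer_bem_category(field_name: str, field_data: dict) -> str:
--     if field_data.get('type') == 'RadioGroup':
--         return 'general-information'
--
--     field_name_lower = field_name.lower()
--
--     # Field already carries BEM naming: return its Block part.
--     if '_' in field_name and any(block in field_name_lower for block in
--                                  ('personal-information', 'contingent-benficiary', 'sign-here')):
--         parts = field_name.split('_')
--         if len(parts) >= 2: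
--             return parts[0]
--
--     best = 29
--     for i in range(len(field_name_lower)):
--         for length in _LENGTHS:
--             r = _RANK_OF.get(field_name_lower[i:i + length])
--             if r is not None and r < best:
--                 best = r
--     return _CATEGORY[best]
-- ===== Notes on version B (the rewrite author's own statement) =====
-- stated objective: alternative
-- what changed: Inverted the search: instead of testing each keyword for containment in the name (A's if/elif chain of any() scans), B slides over every substring of the lowered name, looks each up in a precomputed term->rank hash map, keeps the minimum rank, and maps that rank to its category; first-match-in-rule-order equals minimal rank.
import Mathlib
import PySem

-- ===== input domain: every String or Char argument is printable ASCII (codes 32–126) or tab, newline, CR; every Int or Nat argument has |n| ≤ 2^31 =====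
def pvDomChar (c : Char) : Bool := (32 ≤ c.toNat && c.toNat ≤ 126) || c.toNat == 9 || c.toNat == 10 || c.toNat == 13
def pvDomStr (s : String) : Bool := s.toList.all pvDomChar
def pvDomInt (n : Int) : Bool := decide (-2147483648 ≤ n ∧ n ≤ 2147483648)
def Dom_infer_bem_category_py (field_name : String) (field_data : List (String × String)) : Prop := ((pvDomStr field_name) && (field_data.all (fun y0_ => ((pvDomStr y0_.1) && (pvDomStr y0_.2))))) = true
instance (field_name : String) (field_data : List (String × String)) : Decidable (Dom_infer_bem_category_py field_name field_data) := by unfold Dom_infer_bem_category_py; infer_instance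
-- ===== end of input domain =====

-- B inverts A's search: instead of testing each keyword for containment in the name,
-- B scans every substring of the lowered name against a term->rank map and keeps the
-- minimal rank (alternative algorithm; same results since first rule order = min rank).

-- ===== PORT A =====
-- the if/elif chain of grouped substring tests (fall-through tail of A)
def pvPatternsA (lower : String) : String :=
  if ["name", "first", "last", "middle", "mi"].any (fun t => PySem.Str.isIn t lower) then
    "personal-information"
  else if ["ssn", "social", "security"].any (fun t => PySem.Str.isIn t lower) then
    "personal-information"
  else if ["address", "street", "city", "state", "zip", "postal"].any (fun t => PySem.Str.isIn t lower) then
    "personal-information"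
  else if ["phone", "email", "contact"].any (fun t => PySem.Str.isIn t lower) then
    "personal-information"
  else if ["signature", "sign", "date"].any (fun t => PySem.Str.isIn t lower) then
    "sign-here"
  else if ["beneficiary", "contingent", "primary"].any (fun t => PySem.Str.isIn t lower) then
    "contingent-benficiary"
  else if ["employer", "company", "organization"].any (fun t => PySem.Str.isIn t lower) then
    "employer-information"
  else if ["tax", "withholding", "allowance"].any (fun t => PySem.Str.isIn t lower) then
    "tax-information"
  else
    "general-information"

def infer_bem_category_py (field_name : String) (field_data : List (String × String)) : String :=
  let field_name_lower := PySem.Str.lower field_name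
  if (PySem.Dict.ofList field_data).get? "type" == some "RadioGroup" then
    "general-information"
  else if PySem.Str.isIn "_" field_name &&
      ["personal-information", "contingent-benficiary", "sign-here"].any
        (fun block => PySem.Str.isIn block field_name_lower) then
    let parts := (PySem.Str.split? field_name "_").getD []  -- sep "_" ≠ "": split? is always some, exact
    if 2 ≤ parts.length then
      PySem.List.pyGetD parts 0 ""   -- parts[0]; guarded by len(parts) >= 2, never raises
    else
      pvPatternsA field_name_lower
  else
    pvPatternsA field_name_lower

-- ===== PORT B =====
def pvRankPairs : List (String × Nat) :=
  [("name", 0), ("first", 1), ("last", 2), ("middle", 3), ("mi", 4),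
   ("ssn", 5), ("social", 6), ("security", 7),
   ("address", 8), ("street", 9), ("city", 10), ("state", 11),
   ("zip", 12), ("postal", 13),
   ("phone", 14), ("email", 15), ("contact", 16),
   ("signature", 17), ("sign", 18), ("date", 19),
   ("beneficiary", 20), ("contingent", 21), ("primary", 22),
   ("employer", 23), ("company", 24), ("organization", 25),
   ("tax", 26), ("withholding", 27), ("allowance", 28)]

def pvRankOf : PySem.Dict String Nat := PySem.Dict.ofList pvRankPairs

-- categories by rank; index 29 = the 'no term found' sentinel
def pvCategory : List String :=
  List.replicate 17 "personal-information" ++ List.replicate 3 "sign-here" ++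
  List.replicate 3 "contingent-benficiary" ++ List.replicate 3 "employer-information" ++
  List.replicate 3 "tax-information" ++ ["general-information"]

def pvLengths : List Int := [2, 3, 4, 5, 6, 7, 8, 9, 10, 11, 12]

-- the nested scan: for i in range(len(lower)): for length in _LENGTHS: ...
def pvScanBest (lower : String) : Nat :=
  (PySem.List.pyRange 0 (PySem.Str.len lower) 1).foldl (fun best i =>
    pvLengths.foldl (fun best length =>
      match pvRankOf.get? (PySem.Str.slice lower (some i) (some (i + length))) with
      | some r => if r < best then r else best
      | none => best) best) 29

def infer_bem_category_py_alt (field_name : String) (field_data : List (String × String)) : String :=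
  if (PySem.Dict.ofList field_data).get? "type" == some "RadioGroup" then
    "general-information"
  else
    let field_name_lower := PySem.Str.lower field_name
    if PySem.Str.isIn "_" field_name &&
        ["personal-information", "contingent-benficiary", "sign-here"].any
          (fun block => PySem.Str.isIn block field_name_lower) then
      let parts := (PySem.Str.split? field_name "_").getD []  -- sep "_" ≠ "": split? is always some, exact
      if 2 ≤ parts.length then
        PySem.List.pyGetD parts 0 ""
      else
        PySem.List.pyGetD pvCategory (pvScanBest field_name_lower : Int) ""
    else
      PySem.List.pyGetD pvCategory (pvScanBest field_name_lower : Int) ""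

-- ===== PRECONDITION & SPEC =====
def Spec_infer_bem_category_py (field_name : String) (field_data : List (String × String)) (out : String) : Prop := out = infer_bem_category_py_alt field_name field_data
instance (field_name : String) (field_data : List (String × String)) (out : String) : Decidable (Spec_infer_bem_category_py field_name field_data out) := by unfold Spec_infer_bem_category_py; infer_instance

-- ===== CLAIM (what is proved, stated in full; the proofs are below) =====
def Claim_equal_infer_bem_category_py : Prop := ∀ (field_name : String) (field_data : List (String × String)), Dom_infer_bem_category_py field_name field_data → Spec_infer_bem_category_py field_name field_data (infer_bem_category_py field_name field_data)

-- ===== LEMMAS AND PROOFS =====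

-- first-match scan over a (term, category) table: reference form of A's chain
def pvFindCat : List (String × String) → String → String
  | [], _ => "general-information"
  | (t, c) :: rest, lower => if PySem.Str.isIn t lower then c else pvFindCat rest lower

def pvTermTable : List (String × String) :=
  pvRankPairs.map (fun p => (p.1, pvCategory.getD p.2 ""))

theorem pvTermTable_eq : pvTermTable =
  [("name", "personal-information"), ("first", "personal-information"),
   ("last", "personal-information"), ("middle", "personal-information"),
   ("mi", "personal-information"), ("ssn", "personal-information"),
   ("social", "personal-information"), ("security", "personal-information"),
   ("address", "personal-information"), ("street", "personal-information"),
   ("city", "personal-information"), ("state", "personal-information"),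
   ("zip", "personal-information"), ("postal", "personal-information"),
   ("phone", "personal-information"), ("email", "personal-information"),
   ("contact", "personal-information"),
   ("signature", "sign-here"), ("sign", "sign-here"), ("date", "sign-here"),
   ("beneficiary", "contingent-benficiary"), ("contingent", "contingent-benficiary"),
   ("primary", "contingent-benficiary"),
   ("employer", "employer-information"), ("company", "employer-information"),
   ("organization", "employer-information"),
   ("tax", "tax-information"), ("withholding", "tax-information"),
   ("allowance", "tax-information")] := by decide

-- 'if a or b then c else X' unfolds into the nested first-match form
theorem pv_if_or (a b : Bool) (c X : String) :
    (if (a || b) = true then c else X) = (if a = true then c else if b = true then c else X) := by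
  cases a <;> simp

-- A's grouped if/elif chain equals the flattened first-match table scan
theorem pv_patterns_eq_findCat (lower : String) :
    pvPatternsA lower = pvFindCat pvTermTable lower := by
  rw [pvTermTable_eq]
  simp only [pvPatternsA, pvFindCat, List.any_cons, List.any_nil, Bool.or_false, pv_if_or]

-- generic: first-match scan = category list indexed by findIdx
theorem pv_findCat_eq_findIdx (tbl : List (String × String)) (lower : String) :
    pvFindCat tbl lower =
      (tbl.map Prod.snd ++ ["general-information"]).getD
        (tbl.findIdx (fun p => PySem.Str.isIn p.1 lower)) "" := by
  induction tbl with
  | nil => rfl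
  | cons hd tl ih =>
    obtain ⟨t, c⟩ := hd
    by_cases h : PySem.Str.isIn t lower = true
    all_goals simp only [Bool.not_eq_true, PySem.Str.isIn_eq] at h
    · simp [pvFindCat, h, List.findIdx_cons]
    · simp [pvFindCat, h, List.findIdx_cons, ih, List.getD]

-- concrete facts, all by decide
theorem pv_items : pvRankOf.items = pvRankPairs := by decide
theorem pv_pair_facts : ∀ p ∈ pvRankPairs, p.2 < 29 ∧ p.1.toList ≠ [] ∧
    (pvRankPairs.map Prod.fst).getD p.2 "" = p.1 := by decide
set_option maxRecDepth 8000 in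
theorem pv_term_facts : ∀ r < 29,
    ((pvRankPairs.map Prod.fst).getD r "").toList ≠ [] ∧
    (((pvRankPairs.map Prod.fst).getD r "").toList.length : Int) ∈ pvLengths ∧
    pvRankOf.get? ((pvRankPairs.map Prod.fst).getD r "") = some r := by decide
theorem pv_len_pos : ∀ L ∈ pvLengths, 0 < L := by decide

theorem pv_found_iff (lower : String) (r : Nat) :
    (∃ i ∈ PySem.List.pyRange 0 (PySem.Str.len lower) 1, ∃ L ∈ pvLengths,
      pvRankOf.get? (PySem.Str.slice lower (some i) (some (i + L))) = some r) ↔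
    (r < 29 ∧ PySem.Str.isIn ((pvRankPairs.map Prod.fst).getD r "") lower = true) := by
  constructor
  · rintro ⟨i, hi, L, hL, hget⟩
    have hmem := PySem.Dict.mem_items_of_get?_eq_some _ hget
    rw [pv_items] at hmem
    obtain ⟨hr29, -, hterm⟩ := pv_pair_facts _ hmem
    refine ⟨hr29, ?_⟩
    rw [hterm]
    -- the slice is an infix of lower
    rw [PySem.Str.isIn_eq, PySem.Chars.isIn_iff_infix]
    obtain ⟨hi0, hin⟩ := PySem.List.mem_pyRange_one.mp hi
    have hL0 := pv_len_pos L hL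
    have hslice : (PySem.Str.slice lower (some i) (some (i + L))).toList
        = List.take L.toNat (List.drop i.toNat lower.toList) := by
      rw [PySem.Str.toList_slice, PySem.Chars.slice_eq_listSlice]
      have : i = (i.toNat : Int) := (Int.toNat_of_nonneg hi0).symm
      have hL' : L = (L.toNat : Int) := (Int.toNat_of_nonneg (le_of_lt hL0)).symm
      rw [this, hL', PySem.List.slice_natCast_add]
      simp only [Int.toNat_natCast]
    rw [hslice]
    exact ((List.take_prefix _ _).isInfix).trans (List.drop_suffix _ _).isInfix
  · rintro ⟨hr29, hin⟩
    obtain ⟨hne, hlen, hget⟩ := pv_term_facts r hr29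
    set t := (pvRankPairs.map Prod.fst).getD r "" with ht
    rw [PySem.Str.isIn_eq] at hin
    obtain ⟨j, hj⟩ := (PySem.Chars.exists_prefix_drop_iff_isIn t.toList lower.toList).mpr hin
    have hjlt : j < lower.toList.length := by
      by_contra hge
      rw [List.drop_eq_nil_of_le (by omega)] at hj
      exact hne (List.prefix_nil.mp hj)
    refine ⟨(j : Int), ?_, (t.toList.length : Int), hlen, ?_⟩
    · rw [PySem.List.mem_pyRange_one, PySem.Str.len_eq]
      omega
    · have hslice : PySem.Str.slice lower (some (j : Int)) (some ((j : Int) + (t.toList.length : Int))) = t := by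
        have : (PySem.Str.slice lower (some (j : Int)) (some ((j : Int) + (t.toList.length : Int)))).toList
            = List.take t.toList.length (List.drop j lower.toList) := by
          rw [PySem.Str.toList_slice, PySem.Chars.slice_eq_listSlice, PySem.List.slice_natCast_add]
        have htake : List.take t.toList.length (List.drop j lower.toList) = t.toList :=
          (List.prefix_iff_eq_take.mp hj).symm
        exact String.toList_inj.mp (this.trans htake)
      rw [hslice, hget]

theorem pv_fold_min_char {α : Type} (f : α → Option Nat) (xs : List α) (b : Nat) :
    (xs.foldl (fun best x => match f x with
        | some r => if r < best then r else best
        | none => best) b = b ∨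
      ∃ x ∈ xs, f x = some (xs.foldl (fun best x => match f x with
        | some r => if r < best then r else best
        | none => best) b)) ∧
    (∀ x ∈ xs, ∀ r, f x = some r →
      xs.foldl (fun best x => match f x with
        | some r => if r < best then r else best
        | none => best) b ≤ r) ∧
    xs.foldl (fun best x => match f x with
        | some r => if r < best then r else best
        | none => best) b ≤ b := by
  induction xs generalizing b with
  | nil => simp
  | cons x xs ih =>
    simp only [List.foldl_cons]
    obtain ⟨h1, h2, h3⟩ := ih (match f x with | some r => if r < b then r else b | none => b)
    have hb'b : (match f x with | some r => if r < b then r else b | none => b) ≤ b := by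
      cases hfx : f x with
      | none => simp
      | some r => simp only; split <;> omega
    refine ⟨?_, ?_, le_trans h3 hb'b⟩
    · rcases h1 with h | ⟨y, hy, hfy⟩
      · cases hfx : f x with
        | none => rw [hfx] at h; simp only at h; exact Or.inl h
        | some r =>
          rw [hfx] at h; simp only at h
          by_cases hr : r < b
          · rw [if_pos hr] at h
            exact Or.inr ⟨x, List.mem_cons_self, by simp [hfx, hr, h]⟩
          · rw [if_neg hr] at h; exact Or.inl (by simpa [hr] using h)
      · exact Or.inr ⟨y, List.mem_cons_of_mem _ hy, hfy⟩
    · intro y hy r hfy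
      rcases List.mem_cons.mp hy with rfl | hy'
      · have : (match f y with | some r => if r < b then r else b | none => b) ≤ r := by
          rw [hfy]; simp only; split <;> omega
        exact le_trans h3 this
      · exact h2 y hy' r hfy


-- nested fold over (i, L) pairs = flat fold over the product list
theorem pv_foldl_foldl {α β γ : Type} (g : α × β → γ → γ) (xs : List α) (ys : List β) (b : γ) :
    xs.foldl (fun b i => ys.foldl (fun b y => g (i, y) b) b) b
      = (xs.flatMap (fun i => ys.map (Prod.mk i))).foldl (fun b p => g p b) b := by
  induction xs generalizing b with
  | nil => rfl
  | cons x xs ih =>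
    simp only [List.foldl_cons, List.flatMap_cons, List.foldl_append, List.foldl_map, ih]

theorem pv_scan_eq_findIdx (lower : String) :
    pvScanBest lower =
      List.findIdx (fun t => PySem.Str.isIn t lower) (pvRankPairs.map Prod.fst) := by
  have hflat := pv_foldl_foldl
    (fun p best => match pvRankOf.get? (PySem.Str.slice lower (some p.1) (some (p.1 + p.2))) with
      | some r => if r < best then r else best
      | none => best)
    (PySem.List.pyRange 0 (PySem.Str.len lower) 1) pvLengths 29
  obtain ⟨h1, h2, h3⟩ := pv_fold_min_char
    (fun p : Int × Int => pvRankOf.get? (PySem.Str.slice lower (some p.1) (some (p.1 + p.2))))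
    ((PySem.List.pyRange 0 (PySem.Str.len lower) 1).flatMap (fun i => pvLengths.map (Prod.mk i))) 29
  have hscan : pvScanBest lower =
      ((PySem.List.pyRange 0 (PySem.Str.len lower) 1).flatMap (fun i => pvLengths.map (Prod.mk i))).foldl
        (fun b p => match pvRankOf.get? (PySem.Str.slice lower (some p.1) (some (p.1 + p.2))) with
          | some r => if r < b then r else b
          | none => b) 29 := hflat
  rw [← hscan] at h1 h2 h3
  have hfound : ∀ r : Nat,
      (∃ p ∈ (PySem.List.pyRange 0 (PySem.Str.len lower) 1).flatMap (fun i => pvLengths.map (Prod.mk i)),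
        pvRankOf.get? (PySem.Str.slice lower (some p.1) (some (p.1 + p.2))) = some r)
      ↔ (r < 29 ∧ PySem.Str.isIn ((pvRankPairs.map Prod.fst).getD r "") lower = true) := by
    intro r
    rw [← pv_found_iff]
    constructor
    · rintro ⟨⟨i, L⟩, hp, hg⟩
      rw [List.mem_flatMap] at hp
      obtain ⟨i2, hi2, hmem⟩ := hp
      obtain ⟨L2, hL2, heq⟩ := List.mem_map.mp hmem
      rw [← heq] at hg; exact ⟨i2, hi2, L2, hL2, hg⟩
    · rintro ⟨i, hi, L, hL, hg⟩
      exact ⟨(i, L), List.mem_flatMap.mpr ⟨i, hi, List.mem_map.mpr ⟨L, hL, rfl⟩⟩, hg⟩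
  have hTlen : (pvRankPairs.map Prod.fst).length = 29 := rfl
  have hkle : List.findIdx (fun t => PySem.Str.isIn t lower) (pvRankPairs.map Prod.fst) ≤ 29 :=
    hTlen ▸ List.findIdx_le_length
  have hge : List.findIdx (fun t => PySem.Str.isIn t lower) (pvRankPairs.map Prod.fst) ≤ pvScanBest lower := by
    rcases h1 with h | ⟨q, hq, hgq⟩
    · rw [h]; exact hkle
    · obtain ⟨hr29, hin⟩ := (hfound _).mp ⟨q, hq, hgq⟩
      by_contra hnle
      have hlt : pvScanBest lower <
          List.findIdx (fun t => PySem.Str.isIn t lower) (pvRankPairs.map Prod.fst) := by omega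
      have hfalse := List.not_of_lt_findIdx (p := fun t => PySem.Str.isIn t lower)
        (xs := pvRankPairs.map Prod.fst) hlt
      rw [List.getD_eq_getElem?_getD] at hin
      have hfalse' : PySem.Str.isIn (((pvRankPairs.map Prod.fst)[pvScanBest lower]?).getD "") lower = false := by
        rw [List.getElem?_eq_getElem (by omega), Option.getD_some]; exact hfalse
      rw [hin] at hfalse'
      simp at hfalse'
  have hle2 : pvScanBest lower ≤ List.findIdx (fun t => PySem.Str.isIn t lower) (pvRankPairs.map Prod.fst) := by
    by_cases hk29 : List.findIdx (fun t => PySem.Str.isIn t lower) (pvRankPairs.map Prod.fst) = 29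
    · rw [hk29]; exact h3
    · have hklt : List.findIdx (fun t => PySem.Str.isIn t lower) (pvRankPairs.map Prod.fst) < 29 := by omega
      have hpk : PySem.Str.isIn ((pvRankPairs.map Prod.fst).getD
          (List.findIdx (fun t => PySem.Str.isIn t lower) (pvRankPairs.map Prod.fst)) "") lower = true := by
        rw [List.getD_eq_getElem?_getD, List.getElem?_eq_getElem (by omega), Option.getD_some]
        have := @List.findIdx_getElem _ (fun t => PySem.Str.isIn t lower) (pvRankPairs.map Prod.fst) (by omega)
        simpa using this
      obtain ⟨p, hp, hg⟩ := (hfound _).mpr ⟨hklt, hpk⟩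
      exact h2 p hp _ hg
  omega

theorem pv_scan_part_eq (lower : String) :
    PySem.List.pyGetD pvCategory (pvScanBest lower : Int) "" = pvPatternsA lower := by
  rw [pv_patterns_eq_findCat, pv_findCat_eq_findIdx, PySem.List.pyGetD_natCast, pv_scan_eq_findIdx]
  have h1 : pvTermTable.map Prod.snd ++ ["general-information"] = pvCategory := by decide
  have h2 : pvTermTable.findIdx (fun p => PySem.Str.isIn p.1 lower)
      = List.findIdx (fun t => PySem.Str.isIn t lower) (pvRankPairs.map Prod.fst) := by
    rw [pvTermTable, List.findIdx_map, List.findIdx_map]; rfl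
  rw [h1, h2]

theorem infer_bem_category_py_eq (field_name : String) (field_data : List (String × String)) :
    infer_bem_category_py field_name field_data = infer_bem_category_py_alt field_name field_data := by
  simp only [infer_bem_category_py, infer_bem_category_py_alt, pv_scan_part_eq]

-- ===== VERDICT (by name: the statement is the Claim_ definition above) =====
theorem infer_bem_category_py_spec : Claim_equal_infer_bem_category_py := by
  intro field_name field_data _
  unfold Spec_infer_bem_category_py
  exact infer_bem_category_py_eq field_name field_data
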